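-- pv_equiv track=rewrite | github.com/q-horton/uqcs-codejam | 2022/Root 1.py | find_min_hp
-- ===== SOURCE A (Python) =====
-- def find_min_hp(rds, b):
--     # Write your code here
--     max_d = 0
--     for i in rds:
--         if i > max_d:
--             max_d = i
--     hp = 0
--     b_used = False
--     for j in rds:
--         if j == max_d and not b_used:
--             if max_d > b:
--                 hp += j - b
--                 b_used = True
--         else:
--             hp += j
--     return hp + 1
-- ===== SOURCE B (Python) =====
-- def find_min_hp(rds, b):
--     hp = sum(rds) + 1
--     biggest = max(rds, default=0)
--     if biggest > 0:
--         hp -= min(b, biggest)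
--     return hp
-- ===== Notes on version B (the rewrite author's own statement) =====
-- stated objective: simpler
-- what changed: Replaces A's two loops with a b_used flag by the closed form sum(rds) - min(b, positive max) + 1; Pre_ excludes only the corner of a negative block b on a list whose maximum is exactly 0, where A's 0-initialised running max accidentally matches the zero hit and A subtracts the negative block from it.
-- intended difference: When the block b is at least the maximal positive hit and that hit occurs more than once, A silently erases every copy of the maximum (returning sum minus max times its multiplicity, plus 1) while B subtracts the blocked amount only once, which is the intended 'reduce one max hit' behaviour. — e.g. on find_min_hp([3, 3], 5): A returns 1, B returns 4
-- outside the precondition, e.g. on find_min_hp([0], -1): A returns 2, B returns 1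
import Mathlib
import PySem

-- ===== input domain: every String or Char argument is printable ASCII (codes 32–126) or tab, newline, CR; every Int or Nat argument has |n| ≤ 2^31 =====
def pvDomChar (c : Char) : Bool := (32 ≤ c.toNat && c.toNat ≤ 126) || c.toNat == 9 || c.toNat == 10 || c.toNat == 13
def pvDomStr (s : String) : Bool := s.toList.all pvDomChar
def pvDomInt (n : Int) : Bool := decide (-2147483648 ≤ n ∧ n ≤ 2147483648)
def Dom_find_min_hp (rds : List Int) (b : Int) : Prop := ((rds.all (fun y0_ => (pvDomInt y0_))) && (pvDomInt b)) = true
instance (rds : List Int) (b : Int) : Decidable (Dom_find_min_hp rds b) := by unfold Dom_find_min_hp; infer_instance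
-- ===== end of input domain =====

-- B computes sum(rds) - min(b, positive max) + 1 in closed form instead of A's two loops with a flag;
-- on duplicated maxima not exceeding b the values intentionally differ (see D_ below).

-- ===== PORT A =====
def find_min_hp (rds : List Int) (b : Int) : Int :=
  let max_d := rds.foldl (fun m i => if i > m then i else m) 0
  let st := rds.foldl (fun (s : Int × Bool) j =>
      if j = max_d ∧ s.2 = false then
        (if max_d > b then (s.1 + (j - b), true) else s)
      else (s.1 + j, s.2)) ((0 : Int), false)
  st.1 + 1

-- ===== PORT B =====
def find_min_hp_alt (rds : List Int) (b : Int) : Int :=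
  let hp := rds.sum + 1
  let biggest := (PySem.List.max? rds (fun y => y)).getD 0
  if biggest > 0 then hp - min b biggest else hp

-- ===== PRECONDITION & SPEC =====
-- Pre_ excludes only the corner of a negative block b on a list whose maximum is exactly 0: there A's
-- 0-initialised running max accidentally matches the zero hit and A subtracts the negative block from it,
-- while B (naturally) applies no block; negative block values are outside the function's natural domain.
def Pre_find_min_hp (rds : List Int) (b : Int) : Prop :=
  0 ≤ b ∨ (0 : Int) ∉ rds ∨ rds.foldl max 0 ≠ 0
instance (rds : List Int) (b : Int) : Decidable (Pre_find_min_hp rds b) := by unfold Pre_find_min_hp; infer_instance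
def pvWitness_find_min_hp : List Int × Int := ([2, 5, 1], 3)

-- When the block b is at least the maximal positive hit and that hit occurs more than once, A erases
-- every copy of the maximum; B subtracts the blocked amount once, the intended 'reduce one max hit' value.
def D_find_min_hp (rds : List Int) (b : Int) : Prop :=
  0 < rds.foldl max 0 ∧ rds.foldl max 0 ≤ b ∧ 2 ≤ rds.count (rds.foldl max 0)
instance (rds : List Int) (b : Int) : Decidable (D_find_min_hp rds b) := by unfold D_find_min_hp; infer_instance

def Spec_find_min_hp (rds : List Int) (b : Int) (out : Int) : Prop :=
  ¬ D_find_min_hp rds b → out = find_min_hp_alt rds b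
instance (rds : List Int) (b : Int) (out : Int) : Decidable (Spec_find_min_hp rds b out) := by unfold Spec_find_min_hp; infer_instance

def pvDiffWitness_find_min_hp : List Int × Int := ([3, 3], 5)
def pvDiffWitnessOut_find_min_hp : Int × Int := (1, 4)

-- ===== CLAIM (what is proved, stated in full; the proofs are below) =====
def Claim_unchanged_find_min_hp : Prop := ∀ (rds : List Int) (b : Int), Dom_find_min_hp rds b → Pre_find_min_hp rds b → Spec_find_min_hp rds b (find_min_hp rds b)
def Claim_changed_find_min_hp : Prop := Dom_find_min_hp (pvDiffWitness_find_min_hp.1) (pvDiffWitness_find_min_hp.2) ∧ Pre_find_min_hp (pvDiffWitness_find_min_hp.1) (pvDiffWitness_find_min_hp.2) ∧ D_find_min_hp (pvDiffWitness_find_min_hp.1) (pvDiffWitness_find_min_hp.2) ∧ find_min_hp (pvDiffWitness_find_min_hp.1) (pvDiffWitness_find_min_hp.2) = pvDiffWitnessOut_find_min_hp.1 ∧ find_min_hp_alt (pvDiffWitness_find_min_hp.1) (pvDiffWitness_find_min_hp.2) = pvDiffWitnessOut_find_min_hp.2 ∧ pvDiffWitnessOut_find_min_hp.1 ≠ pv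DiffWitnessOut_find_min_hp.2
def Claim_exact_find_min_hp : Prop := ∀ (rds : List Int) (b : Int), Dom_find_min_hp rds b → Pre_find_min_hp rds b → D_find_min_hp rds b → find_min_hp rds b ≠ find_min_hp_alt rds b

-- ===== LEMMAS AND PROOFS =====

-- A's running-max loop is foldl max.
theorem fmh_maxA_eq (l : List Int) (a : Int) :
    l.foldl (fun m i => if i > m then i else m) a = l.foldl max a := by
  induction l generalizing a with
  | nil => rfl
  | cons x t ih =>
      simp only [List.foldl_cons, ih]
      congr 1
      rcases le_total x a with h | h
      · simp [max_eq_left h]; omega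
      · simp [max_eq_right h]; omega

theorem fmh_foldl_max_out (l : List Int) (a c : Int) :
    l.foldl max (max a c) = max a (l.foldl max c) := by
  induction l generalizing c with
  | nil => rfl
  | cons x t ih => simp only [List.foldl_cons, max_assoc, ih]

theorem fmh_foldl_max_mem (t : List Int) (x : Int) : t.foldl max x ∈ x :: t := by
  induction t generalizing x with
  | nil => simp
  | cons y t ih =>
      rw [List.foldl_cons]
      rcases le_total x y with hxy | hxy
      · rw [max_eq_right hxy]
        have h := ih y
        simp only [List.mem_cons] at h ⊢
        tauto
      · rw [max_eq_left hxy]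
        have h := ih x
        simp only [List.mem_cons] at h ⊢
        tauto

-- A's second loop, flag already true: pure summation.
theorem fmh_loop_true (md b : Int) (l : List Int) (acc : Int) :
    l.foldl (fun (s : Int × Bool) j =>
      if j = md ∧ s.2 = false then
        (if md > b then (s.1 + (j - b), true) else s)
      else (s.1 + j, s.2)) (acc, true) = (acc + l.sum, true) := by
  induction l generalizing acc with
  | nil => simp
  | cons x t ih => simp [ih]; ring

-- A's second loop with md > b, flag false: subtract b once at the first copy of md.
theorem fmh_loop_gt (md b : Int) (hgt : md > b) (l : List Int) (acc : Int) :
    l.foldl (fun (s : Int × Bool) j =>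
      if j = md ∧ s.2 = false then
        (if md > b then (s.1 + (j - b), true) else s)
      else (s.1 + j, s.2)) (acc, false)
      = if md ∈ l then (acc + l.sum - b, true) else (acc + l.sum, false) := by
  induction l generalizing acc with
  | nil => simp
  | cons x t ih =>
      by_cases hx : x = md
      · subst hx
        rw [List.foldl_cons, if_pos ⟨rfl, rfl⟩, if_pos hgt, fmh_loop_true]
        simp only [List.mem_cons, true_or, if_pos, List.sum_cons, Prod.mk.injEq, and_true]
        ring
      · rw [List.foldl_cons, if_neg (by simp [hx]), ih]
        have hmm : (md ∈ x :: t) ↔ (md ∈ t) := by simp [Ne.symm hx]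
        by_cases hmt : md ∈ t
        · rw [if_pos hmt, if_pos (hmm.mpr hmt)]
          simp only [List.sum_cons, Prod.mk.injEq]
          exact ⟨by ring, trivial⟩
        · rw [if_neg hmt, if_neg (fun h => hmt (hmm.mp h))]
          simp only [List.sum_cons, Prod.mk.injEq]
          exact ⟨by ring, trivial⟩

-- A's second loop with ¬ md > b, flag false: every copy of md is dropped.
theorem fmh_loop_le (md b : Int) (hle : ¬ md > b) (l : List Int) (acc : Int) :
    l.foldl (fun (s : Int × Bool) j =>
      if j = md ∧ s.2 = false then
        (if md > b then (s.1 + (j - b), true) else s)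
      else (s.1 + j, s.2)) (acc, false)
      = (acc + l.sum - md * l.count md, false) := by
  induction l generalizing acc with
  | nil => simp
  | cons x t ih =>
      by_cases hx : x = md
      · subst hx
        rw [List.foldl_cons, if_pos ⟨rfl, rfl⟩, if_neg hle, ih]
        simp only [List.sum_cons, List.count_cons, Prod.mk.injEq, and_true, BEq.rfl, if_pos]
        push_cast
        ring
      · rw [List.foldl_cons, if_neg (by simp [hx]), ih]
        simp only [List.sum_cons, List.count_cons, beq_iff_eq, hx, if_false, add_zero,
          Prod.mk.injEq]
        exact ⟨by ring, trivial⟩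

-- A's value in closed form, as a function of its 0-floored max M.
theorem fmh_A_closed (rds : List Int) (b : Int) :
    find_min_hp rds b =
      if rds.foldl max 0 > b then
        (if rds.foldl max 0 ∈ rds then rds.sum - b + 1 else rds.sum + 1)
      else rds.sum - (rds.foldl max 0) * rds.count (rds.foldl max 0) + 1 := by
  show (rds.foldl (fun (s : Int × Bool) j =>
      if j = rds.foldl (fun m i => if i > m then i else m) 0 ∧ s.2 = false then
        (if rds.foldl (fun m i => if i > m then i else m) 0 > b then (s.1 + (j - b), true) else s)
      else (s.1 + j, s.2)) ((0 : Int), false)).1 + 1 = _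
  rw [fmh_maxA_eq]
  by_cases hgt : rds.foldl max 0 > b
  · rw [fmh_loop_gt _ _ hgt]
    by_cases hmem : rds.foldl max 0 ∈ rds
    · simp [hmem, hgt]
    · simp [hmem, hgt]
  · rw [fmh_loop_le _ _ hgt]
    simp [hgt]

-- The 0-floored max of a nonempty list is max 0 of its true max, and a positive floored max is in the list.
theorem fmh_M_cons (x : Int) (t : List Int) :
    (x :: t).foldl max 0 = max 0 (t.foldl max x) := by
  rw [List.foldl_cons, ← fmh_foldl_max_out]

-- B's "biggest" equals the true max (for nonempty input).
theorem fmh_biggest_cons (x : Int) (t : List Int) :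
    (PySem.List.max? (x :: t) (fun y => y)).getD 0 = t.foldl max x := by
  rw [PySem.List.max?_id_cons]; rfl

-- ===== VERDICT (by name: the statements are the Claim_ definitions above) =====
theorem find_min_hp_spec : Claim_unchanged_find_min_hp := by
  intro rds b _ hb hD
  unfold Pre_find_min_hp at hb
  unfold D_find_min_hp at hD
  unfold find_min_hp_alt
  rw [fmh_A_closed]
  cases rds with
  | nil =>
      have hnone : (PySem.List.max? ([] : List Int) (fun y => y)) = none := by rfl
      by_cases h0 : (0:Int) > b <;> simp [hnone, h0]
  | cons x t =>
      rw [fmh_biggest_cons]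
      have hMc : (x :: t).foldl max 0 = max 0 (t.foldl max x) := fmh_M_cons x t
      by_cases hpos : 0 < t.foldl max x
      · have hM : (x :: t).foldl max 0 = t.foldl max x := by
          rw [hMc, max_eq_right hpos.le]
        rw [hM] at hD ⊢
        have hmem : t.foldl max x ∈ x :: t := fmh_foldl_max_mem t x
        by_cases hgt : t.foldl max x > b
        · simp only [if_pos hgt, if_pos hmem, if_pos hpos,
            min_eq_left (by omega : b ≤ t.foldl max x)]
          ring
        · have hc1 : (x :: t).count (t.foldl max x) = 1 := by
            have h1 : 1 ≤ (x :: t).count (t.foldl max x) := List.one_le_count_iff.mpr hmem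
            omega
          simp only [if_neg hgt, hc1, if_pos hpos,
            min_eq_right (by omega : t.foldl max x ≤ b)]
          push_cast
          ring
      · have hM : (x :: t).foldl max 0 = 0 := by rw [hMc, max_eq_left (by omega)]
        rw [hM]
        by_cases h0 : (0:Int) > b
        · have hnot : (0 : Int) ∉ x :: t := by
            rcases hb with hb | hb | hb
            · omega
            · exact hb
            · exact absurd hM hb
          simp only [if_pos h0, if_neg hnot, if_neg hpos]
        · simp only [if_neg h0, if_neg hpos]
          ring

theorem find_min_hp_changed : Claim_changed_find_min_hp := by
  unfold Claim_changed_find_min_hp; decide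

theorem find_min_hp_tight : Claim_exact_find_min_hp := by
  intro rds b _ hb hD
  unfold D_find_min_hp at hD
  obtain ⟨hpos, hle, hcnt⟩ := hD
  unfold Pre_find_min_hp at hb
  cases rds with
  | nil => simp at hpos
  | cons x t =>
      rw [fmh_A_closed]
      unfold find_min_hp_alt
      rw [fmh_biggest_cons]
      have hMc : (x :: t).foldl max 0 = max 0 (t.foldl max x) := fmh_M_cons x t
      have hApos : 0 < t.foldl max x := by
        by_contra hc
        rw [hMc, max_eq_left (by omega)] at hpos
        omega
      have hM : (x :: t).foldl max 0 = t.foldl max x := by rw [hMc, max_eq_right hApos.le]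
      rw [hM] at hle hcnt ⊢
      simp only [if_neg (by omega : ¬ t.foldl max x > b), if_pos hApos,
        min_eq_right (by omega : t.foldl max x ≤ b)]
      intro h
      have hge : (2 : Int) ≤ ((x :: t).count (t.foldl max x) : Int) := by exact_mod_cast hcnt
      nlinarith
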